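-- pv_equiv track=rewrite | github.com/David-Saeteros/finestra | explainability/big_five/utils.py | max_scores
-- ===== SOURCE A (Python) =====
-- def max_scores(word_score_pairs):
--     result = {}
--     for word, score in word_score_pairs:
--         if word in result:
--             if score > result[word]:
--                 result[word] = score
--         else:
--             result[word] = score
--     return result
-- ===== SOURCE B (Python) =====
-- def max_scores(word_score_pairs):
--     # group-then-reduce: collect all scores per word in one pass, then take each group's max
--     groups = {}
--     for word, score in word_score_pairs:
--         groups.setdefault(word, []).append(score)
--     return {word: max(scores) for word, scores in groups.items()}
-- ===== Notes on version B (the rewrite author's own statement) =====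
-- stated objective: alternative
-- what changed: replaces A's streaming running-max dict (lookup-compare-overwrite per pair) with a group-then-reduce strategy: one pass collects every word's scores into lists, then a dict comprehension reduces each group with max
import Mathlib
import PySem

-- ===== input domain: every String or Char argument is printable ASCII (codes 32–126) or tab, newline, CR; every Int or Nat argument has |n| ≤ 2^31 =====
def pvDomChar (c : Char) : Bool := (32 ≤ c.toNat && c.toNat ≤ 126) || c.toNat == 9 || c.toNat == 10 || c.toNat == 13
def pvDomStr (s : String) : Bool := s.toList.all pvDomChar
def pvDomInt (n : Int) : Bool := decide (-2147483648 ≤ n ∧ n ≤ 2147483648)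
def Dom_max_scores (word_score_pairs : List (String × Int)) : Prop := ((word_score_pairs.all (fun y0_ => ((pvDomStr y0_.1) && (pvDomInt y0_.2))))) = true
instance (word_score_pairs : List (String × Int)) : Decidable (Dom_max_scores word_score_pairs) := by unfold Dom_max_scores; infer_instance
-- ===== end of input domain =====

-- B replaces A's streaming running-max dict with a group-then-reduce pass (alternative decomposition, same cost).

-- ===== PORT A =====
-- one loop step of A: lookup, compare, conditional overwrite
def maxScoresStepA (result : PySem.Dict String Int) (p : String × Int) : PySem.Dict String Int :=
  if result.contains p.1 then
    if p.2 > result.getD p.1 0 then result.insert p.1 p.2 else result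
  else result.insert p.1 p.2

def max_scores (word_score_pairs : List (String × Int)) : List (String × Int) :=
  (word_score_pairs.foldl maxScoresStepA PySem.Dict.empty).items

-- ===== PORT B =====
-- max(scores) for the nonempty group lists B builds (the [] case is unreachable)
def pyMaxList (xs : List Int) : Int :=
  match xs with
  | [] => 0
  | x :: t => t.foldl max x

def max_scores_alt (word_score_pairs : List (String × Int)) : List (String × Int) :=
  let groups := word_score_pairs.foldl
    (fun g p => g.modify p.1 [] (fun ss => ss ++ [p.2])) PySem.Dict.empty
  (groups.items.foldl (fun r q => r.insert q.1 (pyMaxList q.2)) PySem.Dict.empty).items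

-- ===== PRECONDITION & SPEC =====
def Spec_max_scores (word_score_pairs : List (String × Int)) (out : List (String × Int)) : Prop := out = max_scores_alt word_score_pairs
instance (word_score_pairs : List (String × Int)) (out : List (String × Int)) : Decidable (Spec_max_scores word_score_pairs out) := by unfold Spec_max_scores; infer_instance

-- ===== CLAIM (what is proved, stated in full; the proofs are below) =====
def Claim_equal_max_scores : Prop := ∀ (word_score_pairs : List (String × Int)), Dom_max_scores word_score_pairs → Spec_max_scores word_score_pairs (max_scores word_score_pairs)

-- ===== LEMMAS AND PROOFS =====

-- running-max of A's loop on the Option of a key's current value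
def accMax : Option Int → List Int → Option Int
  | o, [] => o
  | none, s :: ss => accMax (some s) ss
  | some v, s :: ss => accMax (some (if s > v then s else v)) ss

theorem ite_gt_eq_max (a b : Int) : (if b > a then b else a) = max a b := by
  by_cases h : b > a <;> simp [h] <;> omega

theorem accMax_some (v : Int) (ss : List Int) :
    accMax (some v) ss = some (ss.foldl max v) := by
  induction ss generalizing v with
  | nil => rfl
  | cons s ss ih => simp [accMax, List.foldl, ih, ite_gt_eq_max]

theorem keysA (ps : List (String × Int)) (d : PySem.Dict String Int) :
    (ps.foldl maxScoresStepA d).keys = PySem.Set.update d.keys (ps.map (·.1)) := by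
  induction ps generalizing d with
  | nil => simp [PySem.Set.update_nil]
  | cons p ps ih =>
      simp only [List.foldl, List.map, PySem.Set.update_cons, ih]
      congr 1
      by_cases hc : d.contains p.1
      · rw [PySem.Set.add_of_mem (by exact (PySem.Dict.contains_iff_mem_keys d p.1).mp hc)]
        simp only [maxScoresStepA, hc, if_true]
        split
        · exact PySem.Dict.keys_insert_of_contains d p.2 hc
        · rfl
      · rw [PySem.Set.add_of_not_mem
          (fun hm => hc ((PySem.Dict.contains_iff_mem_keys d p.1).mpr hm))]
        simp only [maxScoresStepA, hc]
        exact PySem.Dict.keys_insert_of_not_contains d p.2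
          (by simpa using hc)

theorem getA (ps : List (String × Int)) (d : PySem.Dict String Int) (w : String) :
    (ps.foldl maxScoresStepA d).get? w
      = accMax (d.get? w) ((ps.filter (fun p => p.1 == w)).map (·.2)) := by
  induction ps generalizing d with
  | nil => rfl
  | cons p ps ih =>
      simp only [List.foldl, ih, List.filter]
      by_cases hw : p.1 = w
      · subst hw
        simp only [BEq.rfl, List.map]
        have hstep : (maxScoresStepA d p).get? p.1
            = some (match d.get? p.1 with
                    | none => p.2
                    | some v => if p.2 > v then p.2 else v) := by
          unfold maxScoresStepA
          by_cases hc : d.contains p.1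
          · have hex : ∃ v, d.get? p.1 = some v :=
              Option.isSome_iff_exists.mp
                (by rw [← PySem.Dict.contains_eq_isSome_get?]; exact hc)
            obtain ⟨v, hv⟩ := hex
            rw [hv]
            simp only [hc, if_true, PySem.Dict.getD_eq_get?_getD, hv, Option.getD_some]
            split
            · simp_all [PySem.Dict.get?_insert_self]
            · simp_all
          · have hn : d.get? p.1 = none := by
              rw [PySem.Dict.get?_eq_none_iff_contains]; simpa using hc
            simp [hc, hn, PySem.Dict.get?_insert_self]
        rw [hstep]
        cases hdg : d.get? p.1 <;> simp [accMax]
      · have hne : (p.1 == w) = false := by simpa using hw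
        simp only [hne]
        congr 1
        unfold maxScoresStepA
        split
        · split
          · exact PySem.Dict.get?_insert_of_ne d p.2 (fun h => hw h.symm)
          · rfl
        · exact PySem.Dict.get?_insert_of_ne d p.2 (fun h => hw h.symm)

theorem max_scores_spec_aux (ps : List (String × Int)) :
    max_scores ps = max_scores_alt ps := by
  unfold max_scores max_scores_alt
  set G := ps.foldl (fun g p => g.modify p.1 [] (fun ss => ss ++ [p.2]))
      PySem.Dict.empty with hG
  set A := ps.foldl maxScoresStepA PySem.Dict.empty with hA
  have hGkeys : G.keys = PySem.Set.ofList (ps.map (·.1)) := by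
    rw [hG, PySem.Dict.keys_foldl_modify_key]
    simp [PySem.Set.update_nil_left]
  have hGnodup : G.keys.Nodup := by rw [hGkeys]; exact PySem.Set.nodup_ofList _
  have hAkeys : A.keys = PySem.Set.ofList (ps.map (·.1)) := by
    rw [hA, keysA]
    simp [PySem.Set.update_nil_left]
  have hAnodup : A.keys.Nodup := by rw [hAkeys]; exact PySem.Set.nodup_ofList _
  have hGget : ∀ w, G.getD w [] = (ps.filter (fun p => p.1 == w)).map (·.2) := by
    intro w
    rw [hG, PySem.Dict.getD_foldl_modify_append]
    simp
  -- the second dict of B: fresh distinct keys, so its items are a map of G.items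
  have hfresh : (G.items.foldl (fun r q => r.insert q.1 (pyMaxList q.2))
      PySem.Dict.empty).items = G.items.map (fun q => (q.1, pyMaxList q.2)) := by
    rw [PySem.Dict.items_foldl_insert_fresh]
    · rfl
    · intro a _; exact PySem.Dict.contains_empty _
    · exact hGnodup
  rw [hfresh, PySem.Dict.items_eq_map_keys A hAnodup 0,
      PySem.Dict.items_eq_map_keys G hGnodup [], List.map_map, hAkeys, hGkeys]
  apply List.map_congr_left
  intro k hk
  simp only [Function.comp]
  have hne : (ps.filter (fun p => p.1 == k)) ≠ [] := by
    rw [PySem.Set.mem_ofList] at hk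
    obtain ⟨p, hp, hpk⟩ := List.mem_map.mp hk
    intro hnil
    rw [List.filter_eq_nil_iff] at hnil
    exact absurd (by simpa using hpk) (by simpa using hnil p hp)
  rw [hGget k]
  cases hss : ps.filter (fun p => p.1 == k) with
  | nil => exact absurd hss hne
  | cons s rest =>
      have : A.get? k = some ((rest.map (·.2)).foldl max s.2) := by
        rw [hA, getA, PySem.Dict.get?_empty, hss]
        simp [accMax, accMax_some]
      rw [PySem.Dict.getD_eq_get?_getD, this]
      simp [pyMaxList]

-- ===== VERDICT (by name: the statement is the Claim_ definition above) =====
theorem max_scores_spec : Claim_equal_max_scores := by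
  intro ps _
  exact max_scores_spec_aux ps
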